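-- pv_equiv track=rewrite | github.com/stefanoalimonti/carrymath-py | carrymath/carry.py | carry_chain
-- ===== SOURCE A (Python) =====
-- from typing import List, Optional, Sequence, Tuple
--
-- def conv_at(g: Sequence[int], h: Sequence[int], j: int) -> int:
--     """Compute convolution sum at position j: sum_{i=0}^{j} g_i * h_{j-i}.
--
--     Handles boundary: terms with out-of-range index contribute 0.
--
--     >>> conv_at([1, 0, 1], [1, 1, 0], 2)
--     2
--     """
--     s = 0
--     for i in range(j + 1):
--         if i < len(g) and (j - i) < len(h):
--             s += g[i] * h[j - i]
--     return s
--
-- def carry_chain(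
--     g: Sequence[int],
--     h: Sequence[int],
--     base: int = 2,
--     length: Optional[int] = None,
-- ) -> List[int]:
--     """Compute the full carry chain for positional multiplication.
--
--     Parameters
--     ----------
--     g, h : digit sequences (MSB-first model: g[0]=h[0]=1 typically)
--     base : multiplication base
--     length : number of positions to compute (default: len(g) + len(h))
--
--     Returns
--     -------
--     carries : list of length `length`+1 where carries[0] = 0.
--
--     >>> carry_chain([1, 1, 0, 1], [1, 0, 1, 1])  # 13 * 11 in base 2
--     [0, 0, 1, 1, 2, 2, 1, 0]
--     """
--     if length is None:
--         length = len(g) + len(h) - 1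
--     carries = [0]
--     for j in range(length):
--         cv = conv_at(g, h, j)
--         total = cv + carries[-1]
--         carries.append(total // base)
--     return carries
-- ===== SOURCE B (Python) =====
-- from typing import List, Optional, Sequence
--
-- def carry_chain(
--     g: Sequence[int],
--     h: Sequence[int],
--     base: int = 2,
--     length: Optional[int] = None,
-- ) -> List[int]:
--     """Scatter-accumulate the convolution once, then a single linear carry scan
--     with a running carry (instead of recomputing each convolution sum by a gather
--     over all positions and re-reading carries[-1])."""
--     if length is None:
--         length = len(g) + len(h) - 1
--     n = max(length, 0)
--     conv = [0] * n
--     for i in range(min(len(g), n)):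
--         gi = g[i]
--         for k in range(min(len(h), n - i)):
--             conv[i + k] += gi * h[k]
--     carries = [0]
--     carry = 0
--     for cv in conv:
--         carry = (cv + carry) // base
--         carries.append(carry)
--     return carries
-- ===== Notes on version B (the rewrite author's own statement) =====
-- stated objective: alternative
-- what changed: B builds the whole convolution array once by scatter-accumulation (outer loop over g, inner over h, bounds trimmed to the requested length) and then produces the carries in a single linear scan with a running carry, instead of A's per-position gather that recomputes conv_at from scratch for every j and re-reads carries[-1].
import Mathlib
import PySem

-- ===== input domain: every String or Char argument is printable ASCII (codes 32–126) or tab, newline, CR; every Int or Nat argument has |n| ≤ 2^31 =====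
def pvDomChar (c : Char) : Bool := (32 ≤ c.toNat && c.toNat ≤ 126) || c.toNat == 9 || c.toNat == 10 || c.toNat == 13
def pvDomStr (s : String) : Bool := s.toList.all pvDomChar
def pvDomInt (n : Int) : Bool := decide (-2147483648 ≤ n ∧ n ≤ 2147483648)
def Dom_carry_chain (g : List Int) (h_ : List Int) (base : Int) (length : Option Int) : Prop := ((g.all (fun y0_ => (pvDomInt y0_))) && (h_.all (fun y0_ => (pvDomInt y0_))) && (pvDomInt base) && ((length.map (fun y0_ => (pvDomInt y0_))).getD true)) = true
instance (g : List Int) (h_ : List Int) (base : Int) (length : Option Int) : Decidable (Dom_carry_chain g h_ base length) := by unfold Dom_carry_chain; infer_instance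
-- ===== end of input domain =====

-- B replaces A's per-position gather (conv_at recomputed from scratch for every j) by one
-- scatter pass accumulating the convolution array, then a single linear carry scan (alternative
-- decomposition; return value only — no argument is mutated by either version).

-- ===== PORT A =====
def conv_at (g : List Int) (h_ : List Int) (j : Int) : Int :=
  (PySem.List.pyRange 0 (j + 1) 1).foldl
    (fun s i =>
      if i < PySem.List.len g ∧ j - i < PySem.List.len h_ then
        s + PySem.List.pyGetD g i 0 * PySem.List.pyGetD h_ (j - i) 0
      else s) 0

def carry_chain (g : List Int) (h_ : List Int) (base : Int) (length : Option Int) : List Int :=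
  let length' : Int := match length with
    | none => PySem.List.len g + PySem.List.len h_ - 1
    | some l => l
  (PySem.List.pyRange 0 length' 1).foldl
    (fun carries j =>
      let cv := conv_at g h_ j
      let total := cv + PySem.List.pyGetD carries (-1) 0
      carries ++ [PySem.Int.floordiv total base]) [0]

-- ===== PORT B =====
def carry_chain_alt (g : List Int) (h_ : List Int) (base : Int) (length : Option Int) : List Int :=
  let length' : Int := match length with
    | none => PySem.List.len g + PySem.List.len h_ - 1
    | some l => l
  let n : Int := max length' 0
  let conv : List Int :=
    (PySem.List.pyRange 0 (min (PySem.List.len g) n) 1).foldl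
      (fun c i =>
        let gi := PySem.List.pyGetD g i 0
        (PySem.List.pyRange 0 (min (PySem.List.len h_) (n - i)) 1).foldl
          (fun c k =>
            PySem.List.pySetD c (i + k)
              (PySem.List.pyGetD c (i + k) 0 + gi * PySem.List.pyGetD h_ k 0)) c)
      (List.replicate n.toNat 0)
  (conv.foldl
    (fun s cv =>
      let carry := PySem.Int.floordiv (cv + s.2) base
      (s.1 ++ [carry], carry)) (([0] : List Int), (0 : Int))).1

-- ===== PRECONDITION & SPEC =====
-- Pre_ excludes exactly the inputs where the Python A raises ZeroDivisionError:
-- base = 0 together with a positive effective length (A's loop then executes '// base').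
def Pre_carry_chain (g : List Int) (h_ : List Int) (base : Int) (length : Option Int) : Prop :=
  base ≠ 0 ∨ length.getD (PySem.List.len g + PySem.List.len h_ - 1) ≤ 0
instance (g : List Int) (h_ : List Int) (base : Int) (length : Option Int) : Decidable (Pre_carry_chain g h_ base length) := by unfold Pre_carry_chain; infer_instance

def pvWitness_carry_chain : List Int × List Int × Int × Option Int := ([1, 1, 0, 1], [1, 0, 1, 1], 2, none)

def Spec_carry_chain (g : List Int) (h_ : List Int) (base : Int) (length : Option Int) (out : List Int) : Prop := out = carry_chain_alt g h_ base length
instance (g : List Int) (h_ : List Int) (base : Int) (length : Option Int) (out : List Int) : Decidable (Spec_carry_chain g h_ base length out) := by unfold Spec_carry_chain; infer_instance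

-- ===== CLAIM (what is proved, stated in full; the proofs are below) =====
def Claim_equal_carry_chain : Prop := ∀ (g : List Int) (h_ : List Int) (base : Int) (length : Option Int), Dom_carry_chain g h_ base length → Pre_carry_chain g h_ base length → Spec_carry_chain g h_ base length (carry_chain g h_ base length)

-- ===== LEMMAS AND PROOFS =====

-- Mathematical convolution value at position p (the value conv_at computes at j = ↑p).
def convS (g : List Int) (h_ : List Int) (p : Nat) : Int :=
  ((List.range (p + 1)).map (fun i =>
    if i < g.length ∧ p - i < h_.length then g.getD i 0 * h_.getD (p - i) 0 else 0)).sum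

-- The carry recurrence both programs realise.
def cseq (cv : Nat → Int) (base : Int) : Nat → Int
  | 0 => 0
  | p + 1 => PySem.Int.floordiv (cv p + cseq cv base p) base

-- B's carry scan, as structural recursion (appended carries, final carry).
def bRes (base : Int) : List Int → Int → List Int × Int
  | [], carry => ([], carry)
  | x :: t, carry =>
      let c' := PySem.Int.floordiv (x + carry) base
      let r := bRes base t c'
      (c' :: r.1, r.2)

-- B's inner scatter loop, on the Nat level.
def innerF (h_ : List Int) (gi : Int) (i : Nat) (m : Nat) (c : List Int) : List Int :=
  (List.range m).foldl (fun c k => c.set (i + k) (c.getD (i + k) 0 + gi * h_.getD k 0)) c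

-- B's outer scatter loop, on the Nat level.
def scatter (g : List Int) (h_ : List Int) (n : Nat) (M : Nat) (c : List Int) : List Int :=
  (List.range M).foldl (fun c i => innerF h_ (g.getD i 0) i (min h_.length (n - i)) c) c

lemma getD_set_eq (c : List Int) (j : Nat) (v : Int) (p : Nat) :
    (c.set j v).getD p 0 = if j = p ∧ j < c.length then v else c.getD p 0 := by
  by_cases hj : j = p
  · subst hj
    by_cases hl : j < c.length
    · simp [List.getD_eq_getElem?_getD, hl]
    · simp [List.getD_eq_getElem?_getD, hl]
  · simp [List.getD_eq_getElem?_getD, hj]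


lemma length_innerF (h_ : List Int) (gi : Int) (i m : Nat) (c : List Int) :
    (innerF h_ gi i m c).length = c.length := by
  induction m with
  | zero => simp [innerF]
  | succ m ih =>
    unfold innerF at *
    rw [List.range_succ, List.foldl_append]
    simp only [List.foldl_cons, List.foldl_nil, List.length_set]
    exact ih


lemma innerF_getD (h_ : List Int) (gi : Int) (i m : Nat) (c : List Int) (p : Nat)
    (hm : i + m ≤ c.length) :
    (innerF h_ gi i m c).getD p 0 =
      c.getD p 0 + (if i ≤ p ∧ p - i < m then gi * h_.getD (p - i) 0 else 0) := by
  induction m with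
  | zero => simp [innerF]
  | succ m ih =>
    have hm' : i + m ≤ c.length := by omega
    have hl := length_innerF h_ gi i m c
    unfold innerF
    rw [List.range_succ, List.foldl_append]
    simp only [List.foldl_cons, List.foldl_nil]
    rw [show ((List.range m).foldl
        (fun c k => c.set (i + k) (c.getD (i + k) 0 + gi * h_.getD k 0)) c) = innerF h_ gi i m c
      from rfl]
    rw [getD_set_eq, hl]
    by_cases hp : i + m = p
    · subst hp
      rw [if_pos ⟨rfl, by omega⟩, ih hm']
      rw [show (if i ≤ i + m ∧ i + m - i < m then gi * h_.getD (i + m - i) 0 else 0) = 0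
        from by rw [if_neg]; omega]
      rw [if_pos ⟨by omega, by omega⟩]
      rw [show i + m - i = m from by omega]
      ring
    · rw [if_neg (by intro h; exact hp h.1), ih hm']
      congr 1
      split_ifs with h1 h2 h2
      · rfl
      · omega
      · omega
      · rfl


lemma length_scatter (g h_ : List Int) (n M : Nat) (c : List Int) :
    (scatter g h_ n M c).length = c.length := by
  induction M with
  | zero => simp [scatter]
  | succ M ih =>
    unfold scatter at *
    rw [List.range_succ, List.foldl_append]
    simp only [List.foldl_cons, List.foldl_nil, length_innerF]
    exact ih


lemma scatter_getD (g h_ : List Int) (n M : Nat) (c : List Int) (p : Nat)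
    (hc : c.length = n) (hM : M ≤ n) (_hp : p < n) :
    (scatter g h_ n M c).getD p 0 =
      c.getD p 0 + ((List.range M).map (fun i =>
        if i ≤ p ∧ p - i < min h_.length (n - i) then g.getD i 0 * h_.getD (p - i) 0 else 0)).sum := by
  induction M with
  | zero => simp [scatter]
  | succ M ih =>
    have hM' : M ≤ n := by omega
    unfold scatter at *
    rw [List.range_succ, List.foldl_append]
    simp only [List.foldl_cons, List.foldl_nil]
    rw [innerF_getD]
    · rw [ih hM']
      rw [List.map_append, List.sum_append]
      simp only [List.map_cons, List.map_nil, List.sum_cons, List.sum_nil]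
      ring
    · have hls := length_scatter g h_ n M c
      unfold scatter at hls
      rw [hls, hc]
      have := Nat.min_le_right h_.length (n - M)
      omega


lemma sum_range_map_drop_tail (f : Nat → Int) (m n : Nat) (hmn : m ≤ n)
    (h0 : ∀ i, m ≤ i → f i = 0) :
    ((List.range n).map f).sum = ((List.range m).map f).sum := by
  induction n with
  | zero =>
    have : m = 0 := by omega
    subst this; rfl
  | succ n ih =>
    by_cases hm : m = n + 1
    · subst hm; rfl
    · rw [List.range_succ, List.map_append, List.sum_append]
      simp [h0 n (by omega), ih (by omega)]


lemma conv_entry (g h_ : List Int) (n p : Nat) (hp : p < n) :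
    (scatter g h_ n (min g.length n) (List.replicate n (0 : Int))).getD p 0 = convS g h_ p := by
  rw [scatter_getD g h_ n (min g.length n) _ p (by simp) (Nat.min_le_right _ _) hp]
  have hrep : (List.replicate n (0 : Int)).getD p 0 = 0 := by
    simp [List.getD_eq_getElem?_getD]
  rw [hrep, zero_add]
  set F : Nat → Int := fun i =>
    if i < g.length ∧ i ≤ p ∧ p - i < h_.length then g.getD i 0 * h_.getD (p - i) 0 else 0 with hF
  have e1 : ((List.range (min g.length n)).map (fun i =>
      if i ≤ p ∧ p - i < min h_.length (n - i) then g.getD i 0 * h_.getD (p - i) 0 else 0)).sum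
      = ((List.range (min g.length n)).map F).sum := by
    congr 1
    apply List.map_congr_left
    intro i hi
    rw [List.mem_range] at hi
    simp only [hF]
    split_ifs with h1 h2 h2
    · rfl
    · omega
    · omega
    · rfl
  have hz1 : ∀ i, min g.length n ≤ i → F i = 0 := by
    intro i hi
    simp only [hF]
    rw [if_neg]; omega
  have hz2 : ∀ i, p + 1 ≤ i → F i = 0 := by
    intro i hi
    simp only [hF]
    rw [if_neg]; omega
  have e2 := sum_range_map_drop_tail F (min g.length n) (p + 1 + g.length + n) (by omega) hz1
  have e3 := sum_range_map_drop_tail F (p + 1) (p + 1 + g.length + n) (by omega) hz2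
  have e4 : convS g h_ p = ((List.range (p + 1)).map F).sum := by
    unfold convS
    congr 1
    apply List.map_congr_left
    intro i hi
    rw [List.mem_range] at hi
    simp only [hF]
    split_ifs with h1 h2 h2
    · rfl
    · omega
    · omega
    · rfl
  rw [e1, ← e2, e3, ← e4]


lemma conv_at_natCast (g h_ : List Int) (p : Nat) :
    conv_at g h_ (p : Int) = convS g h_ p := by
  unfold conv_at convS
  rw [show ((p : Int) + 1) = ((p + 1 : Nat) : Int) from by push_cast; ring]
  rw [PySem.List.pyRange_zero_natCast, List.foldl_map]
  have hcongr : ∀ x ∈ List.range (p + 1), ∀ s : Int,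
      (if (x : Int) < PySem.List.len g ∧ (p : Int) - (x : Int) < PySem.List.len h_ then
         s + PySem.List.pyGetD g (x : Int) 0 * PySem.List.pyGetD h_ ((p : Int) - (x : Int)) 0
       else s)
      = s + (if x < g.length ∧ p - x < h_.length then g.getD x 0 * h_.getD (p - x) 0 else 0) := by
    intro x hx s
    rw [List.mem_range] at hx
    have hxp : x ≤ p := by omega
    rw [show ((p : Int) - (x : Int)) = ((p - x : Nat) : Int) from by push_cast [hxp]; ring]
    simp only [PySem.List.len_eq, PySem.List.pyGetD_natCast, Nat.cast_lt]
    split_ifs with h1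
    · ring
    · ring
  refine Eq.trans (PySem.List.foldl_congr_mem' _ _ _ _ hcongr) ?_
  rw [PySem.List.foldl_add]
  simp


lemma A_loop (g h_ : List Int) (base : Int) (n : Nat) :
    (PySem.List.pyRange 0 (n : Int) 1).foldl
      (fun carries j =>
        carries ++ [PySem.Int.floordiv (conv_at g h_ j + PySem.List.pyGetD carries (-1) 0) base])
      [0]
    = (List.range (n + 1)).map (cseq (convS g h_) base) := by
  induction n with
  | zero =>
    rw [show ((0 : Nat) : Int) = 0 from rfl, PySem.List.pyRange_one_eq_nil le_rfl]
    simp [cseq]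
  | succ n ih =>
    rw [show ((n + 1 : Nat) : Int) = (n : Int) + 1 from by push_cast; ring]
    rw [PySem.List.pyRange_one_succ_right (Int.natCast_nonneg n)]
    rw [List.foldl_append, ih]
    simp only [List.foldl_cons, List.foldl_nil]
    rw [show (List.range (n + 1)).map (cseq (convS g h_) base)
        = (List.range n).map (cseq (convS g h_) base) ++ [cseq (convS g h_) base n] from by
      simp [List.range_succ]]
    rw [PySem.List.pyGetD_neg_one_append_singleton, conv_at_natCast]
    rw [show (List.range (n + 1 + 1)).map (cseq (convS g h_) base)
        = ((List.range n).map (cseq (convS g h_) base) ++ [cseq (convS g h_) base n])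
          ++ [cseq (convS g h_) base (n + 1)] from by
      simp [List.range_succ]]
    simp [cseq]


lemma alt_conv_eq (g h_ : List Int) (n : Nat) :
    (PySem.List.pyRange 0 (min (PySem.List.len g) (n : Int)) 1).foldl
      (fun c i =>
        (PySem.List.pyRange 0 (min (PySem.List.len h_) ((n : Int) - i)) 1).foldl
          (fun c k =>
            PySem.List.pySetD c (i + k)
              (PySem.List.pyGetD c (i + k) 0 + PySem.List.pyGetD g i 0 * PySem.List.pyGetD h_ k 0)) c)
      (List.replicate n (0 : Int))
    = scatter g h_ n (min g.length n) (List.replicate n (0 : Int)) := by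
  have hg : min (PySem.List.len g) ((n : Nat) : Int) = ((min g.length n : Nat) : Int) := by
    simp only [PySem.List.len_eq]; norm_cast
  rw [hg, PySem.List.pyRange_zero_natCast, List.foldl_map]
  unfold scatter
  apply PySem.List.foldl_congr_mem'
  intro i hi c
  rw [List.mem_range] at hi
  have hin : i ≤ n := by omega
  rw [show ((n : Int) - (i : Int)) = ((n - i : Nat) : Int) from by push_cast [hin]; ring]
  have h2 : min (PySem.List.len h_) ((n - i : Nat) : Int) = ((min h_.length (n - i) : Nat) : Int) := by
    simp only [PySem.List.len_eq]; norm_cast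
  rw [h2, PySem.List.pyRange_zero_natCast, List.foldl_map]
  unfold innerF
  apply PySem.List.foldl_congr_mem'
  intro k hk c'
  rw [show ((i : Int) + (k : Int)) = ((i + k : Nat) : Int) from by push_cast; ring]
  simp only [PySem.List.pySetD_natCast, PySem.List.pyGetD_natCast]


lemma bFold (base : Int) (c : List Int) (out : List Int) (carry : Int) :
    c.foldl
      (fun s cv => (s.1 ++ [PySem.Int.floordiv (cv + s.2) base], PySem.Int.floordiv (cv + s.2) base))
      (out, carry)
    = (out ++ (bRes base c carry).1, (bRes base c carry).2) := by
  induction c generalizing out carry with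
  | nil => simp [bRes]
  | cons x t ih =>
    simp only [List.foldl_cons, bRes]
    rw [ih]
    simp [List.append_assoc]


lemma bRes_cseq (cv : Nat → Int) (base : Int) (c : List Int) (s : Nat)
    (hc : ∀ p, p < c.length → c.getD p 0 = cv (s + p)) :
    (bRes base c (cseq cv base s)).1 = (List.range c.length).map (fun j => cseq cv base (s + j + 1))
    ∧ (bRes base c (cseq cv base s)).2 = cseq cv base (s + c.length) := by
  induction c generalizing s with
  | nil => simp [bRes]
  | cons x t ih =>
    have hx : x = cv s := by
      have := hc 0 (by simp)
      simpa using this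
    simp only [bRes]
    rw [show PySem.Int.floordiv (x + cseq cv base s) base = cseq cv base (s + 1) from by
      rw [hx]; rfl]
    obtain ⟨ih1, ih2⟩ := ih (s + 1) (fun p hp => by
      have := hc (p + 1) (by simp; omega)
      simpa [List.getD_cons_succ] using this |>.trans (by congr 1; omega))
    constructor
    · rw [ih1]
      simp only [List.length_cons]
      rw [List.range_succ_eq_map, List.map_cons, List.map_map]
      refine congrArg₂ List.cons (by simp) ?_
      apply List.map_congr_left
      intro j hj
      show cseq cv base (s + 1 + j + 1) = cseq cv base (s + (j + 1) + 1)
      congr 1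
      omega
    · rw [ih2]
      simp only [List.length_cons]
      congr 1
      omega



lemma core (g h_ : List Int) (base L : Int) :
    (PySem.List.pyRange 0 L 1).foldl
      (fun carries j =>
        carries ++ [PySem.Int.floordiv (conv_at g h_ j + PySem.List.pyGetD carries (-1) 0) base])
      [0]
    = (((PySem.List.pyRange 0 (min (PySem.List.len g) (max L 0)) 1).foldl
        (fun c i =>
          (PySem.List.pyRange 0 (min (PySem.List.len h_) (max L 0 - i)) 1).foldl
            (fun c k =>
              PySem.List.pySetD c (i + k)
                (PySem.List.pyGetD c (i + k) 0 + PySem.List.pyGetD g i 0 * PySem.List.pyGetD h_ k 0)) c)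
        (List.replicate (max L 0).toNat 0)).foldl
        (fun s cv =>
          (s.1 ++ [PySem.Int.floordiv (cv + s.2) base], PySem.Int.floordiv (cv + s.2) base))
        (([0] : List Int), (0 : Int))).1 := by
  by_cases hL : L ≤ 0
  · have hmax : max L 0 = 0 := by omega
    rw [PySem.List.pyRange_one_eq_nil hL, hmax]
    have hming : min (PySem.List.len g) (0 : Int) = 0 := by
      have : (0 : Int) ≤ PySem.List.len g := by simp [PySem.List.len_eq]
      omega
    rw [hming]
    simp [PySem.List.pyRange_one_eq_nil (le_refl (0 : Int))]
  · have hL' : 0 < L := by omega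
    set n : Nat := L.toNat with hn
    have hLn : L = (n : Int) := by omega
    rw [hLn]
    rw [show max ((n : Int)) 0 = (n : Int) from max_eq_left (Int.natCast_nonneg n)]
    rw [A_loop g h_ base n]
    rw [show ((n : Int)).toNat = n from Int.toNat_natCast n]
    rw [alt_conv_eq g h_ n]
    set c := scatter g h_ n (min g.length n) (List.replicate n (0 : Int)) with hcdef
    rw [bFold]
    have hlen : c.length = n := by
      rw [hcdef, length_scatter]; simp
    have hc : ∀ p, p < c.length → c.getD p 0 = convS g h_ (0 + p) := by
      intro p hp
      rw [hcdef]
      rw [conv_entry g h_ n p (by omega)]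
      simp
    have e0 : cseq (convS g h_) base 0 = 0 := rfl
    obtain ⟨h1, h2⟩ := bRes_cseq (convS g h_) base c 0 hc
    rw [e0] at h1
    rw [h1, hlen]
    rw [List.range_succ_eq_map, List.map_cons, List.map_map]
    rw [e0]
    show (0 : Int) :: List.map (cseq (convS g h_) base ∘ Nat.succ) (List.range n)
        = (0 : Int) :: List.map (fun j => cseq (convS g h_) base (0 + j + 1)) (List.range n)
    refine congrArg₂ List.cons rfl ?_
    apply List.map_congr_left
    intro j hj
    show cseq (convS g h_) base (j + 1) = cseq (convS g h_) base (0 + j + 1)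
    congr 1
    omega

-- ===== VERDICT (by name: the statement is the Claim_ definition above) =====
theorem carry_chain_spec : Claim_equal_carry_chain := by
  intro g h_ base length _ _
  unfold Spec_carry_chain carry_chain carry_chain_alt
  cases length with
  | none => exact core g h_ base (PySem.List.len g + PySem.List.len h_ - 1)
  | some l => exact core g h_ base l
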